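-- pv_equiv track=rewrite | github.com/Mvgnu/BioLabs | backend/app/services/sequence_toolkit.py | _max_hairpin_run
-- ===== SOURCE A (Python) =====
-- def _normalize_sequence(seq: str) -> str:
--     """Return uppercase DNA sequence replacing U with T."""
--
--     # purpose: create canonical uppercase DNA sequences for downstream heuristics
--     normalized = (seq or "").upper().replace("U", "T")
--     return normalized
--
-- def _reverse_complement(seq: str) -> str:
--     """Return reverse complement of DNA sequence."""
--
--     table = str.maketrans("ACGTN", "TGCAN")
--     return _normalize_sequence(seq).translate(table)[::-1]
--
-- def _max_hairpin_run(seq: str) -> int: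
--     """Estimate longest complement run contributing to hairpin formation."""
--
--     # purpose: approximate secondary structure risk for single primers
--     sequence = _normalize_sequence(seq)
--     rc = _reverse_complement(sequence)
--     max_run = 0
--     for offset in range(3, len(sequence)):
--         run = 0
--         for idx in range(len(sequence) - offset):
--             if sequence[idx] == rc[offset + idx]:
--                 run += 1
--                 if run > max_run:
--                     max_run = run
--             else:
--                 run = 0
--     return max_run
-- ===== SOURCE B (Python) =====
-- def _max_hairpin_run(seq: str) -> int:
--     # Classic longest-common-substring dynamic programming between the sequence
--     # and its reverse complement: sweep rc one character at a time, keeping a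
--     # row of run lengths ending at each (i, j) cell, and take the best cell
--     # with alignment offset j - i >= 3.  This replaces A's per-offset rescans
--     # by a single row-by-row DP sweep.
--     s = (seq or "").upper().replace("U", "T")
--     rc = s.translate(str.maketrans("ACGTN", "TGCAN"))[::-1]
--     n = len(s)
--     best = 0
--     prev = [0] * n
--     for j in range(n):
--         cur = [0] * n
--         for i in range(n):
--             if s[i] == rc[j]:
--                 cur[i] = prev[i - 1] + 1 if i > 0 else 1
--         for i in range(max(0, j - 2)):
--             if cur[i] > best:
--                 best = cur[i]
--         prev = cur
--     return best
-- ===== Notes on version B (the rewrite author's own statement) =====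
-- stated objective: alternative
-- what changed: B replaces A's per-offset diagonal rescans with the classic longest-common-substring dynamic programming between the sequence and its reverse complement: one row-by-row sweep maintaining an array of run lengths ending at each cell, taking the best cell whose alignment offset is at least 3.
import Mathlib
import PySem

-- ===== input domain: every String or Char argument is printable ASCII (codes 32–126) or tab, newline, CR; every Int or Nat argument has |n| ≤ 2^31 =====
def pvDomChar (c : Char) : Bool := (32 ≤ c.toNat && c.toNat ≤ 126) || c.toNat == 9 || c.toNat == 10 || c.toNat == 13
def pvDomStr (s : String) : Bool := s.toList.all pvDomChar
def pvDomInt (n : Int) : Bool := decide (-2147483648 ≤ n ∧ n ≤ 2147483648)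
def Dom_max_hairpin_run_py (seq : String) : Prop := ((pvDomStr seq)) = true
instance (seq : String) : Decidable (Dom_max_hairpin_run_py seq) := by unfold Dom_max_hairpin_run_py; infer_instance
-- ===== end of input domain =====

-- B replaces A's per-offset rescans of the reverse complement by the classic longest-common-substring
-- dynamic programming (a single row-by-row sweep keeping an array of run lengths per cell);
-- objective: alternative (same asymptotic cost, different algorithmic decomposition).

-- ===== PORT A =====
-- `(seq or "")` on a str equals seq itself (an empty string stays empty), so it is ported as seq.
def pvNormalizeSequence (seq : String) : String :=
  PySem.Str.replace (PySem.Str.upper seq) "U" "T"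

-- str.maketrans("ACGTN", "TGCAN") applied by .translate: a charwise table, others unchanged.
def pvTransChar (c : Char) : Char :=
  if c = 'A' then 'T' else if c = 'C' then 'G' else if c = 'G' then 'C'
  else if c = 'T' then 'A' else if c = 'N' then 'N' else c

-- `.translate(table)` is a charwise map; `[::-1]` is reverse.
def pvReverseComplement (seq : String) : String :=
  String.ofList (((pvNormalizeSequence seq).toList.map pvTransChar).reverse)

def max_hairpin_run_py (seq : String) : Int :=
  let sequence := pvNormalizeSequence seq
  let rc := pvReverseComplement sequence
  let n : Int := PySem.Str.len sequence
  (PySem.List.pyRange 3 n 1).foldl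
    (fun max_run offset =>
      ((PySem.List.pyRange 0 (n - offset) 1).foldl
        (fun (p : Int × Int) idx =>
          if PySem.Str.pyGet? sequence idx = PySem.Str.pyGet? rc (offset + idx) then
            let run := p.1 + 1
            (run, if run > p.2 then run else p.2)
          else (0, p.2))
        (0, max_run)).2)
    0

-- ===== PORT B =====
-- Source B works on the normalized character sequence; `range(n)` / `range(max(0, j-2))` over
-- nonnegative Python ints are ported as List.range (truncated Nat subtraction IS max(0, j-2));
-- the list mutations prev/cur are ported as List.replicate / List.set / getD.
def max_hairpin_run_py_alt (seq : String) : Int :=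
  let s := (PySem.Str.replace (PySem.Str.upper seq) "U" "T").toList
  let rc := (s.map pvTransChar).reverse
  let n := s.length
  ((List.range n).foldl
    (fun (st : List Int × Int) j =>
      let cur := (List.range n).foldl
        (fun cur i =>
          if s[i]? = rc[j]? then
            cur.set i (if 0 < i then st.1.getD (i - 1) 0 + 1 else 1)
          else cur)
        (List.replicate n 0)
      let best := (List.range (j - 2)).foldl
        (fun b i => if cur.getD i 0 > b then cur.getD i 0 else b) st.2
      (cur, best))
    (List.replicate n 0, 0)).2

-- ===== PRECONDITION & SPEC =====
def Spec_max_hairpin_run_py (seq : String) (out : Int) : Prop := out = max_hairpin_run_py_alt seq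
instance (seq : String) (out : Int) : Decidable (Spec_max_hairpin_run_py seq out) := by unfold Spec_max_hairpin_run_py; infer_instance

-- ===== CLAIM (what is proved, stated in full; the proofs are below) =====
def Claim_equal_max_hairpin_run_py : Prop := ∀ (seq : String), Dom_max_hairpin_run_py seq → Spec_max_hairpin_run_py seq (max_hairpin_run_py seq)

-- ===== LEMMAS AND PROOFS =====

-- run length ending at cell (i, j): matches along the diagonal backwards from (i, j)
def pvR (s rc : List Char) : Nat → Nat → Int
  | 0, j => if s[0]? = rc[j]? then 1 else 0
  | i+1, j => if s[i+1]? = rc[j]? then (match j with | 0 => 1 | j'+1 => pvR s rc i j' + 1) else 0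

-- the cells (i, j) with j - i ≥ 3, enumerated diagonal-by-diagonal (A) and row-by-row (B)
def pvCellsA (n : Nat) : List (Nat × Nat) :=
  (List.range (n - 3)).flatMap (fun k => (List.range (n - (k + 3))).map (fun t => (t, k + 3 + t)))

def pvCellsB (n : Nat) : List (Nat × Nat) :=
  (List.range n).flatMap (fun j => (List.range (j - 2)).map (fun i => (i, j)))

def pvMaxF (s rc : List Char) (b : Int) (c : Nat × Nat) : Int := max b (pvR s rc c.1 c.2)

-- normalization facts -------------------------------------------------------

def pvGChar (c : Char) : Char :=
  if PySem.Chars.upperChar c = 'U' then 'T' else PySem.Chars.upperChar c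

theorem pvToNat_ofNat (n : Nat) (h : n < 55296) : (Char.ofNat n).toNat = n := by
  unfold Char.ofNat
  split
  · rfl
  · rename_i hv; exact absurd (Or.inl h) hv

theorem pvUpperChar_idem (c : Char) :
    PySem.Chars.upperChar (PySem.Chars.upperChar c) = PySem.Chars.upperChar c := by
  by_cases h : PySem.Chars.islower c = true
  · have h1 : 97 ≤ c.toNat ∧ c.toNat ≤ 122 := by
      unfold PySem.Chars.islower at h
      simp only [Bool.and_eq_true, decide_eq_true_eq] at h
      exact ⟨Char.le_def.mp h.1, Char.le_def.mp h.2⟩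
    have h3 : PySem.Chars.islower (Char.ofNat (c.toNat - 32)) = false := by
      unfold PySem.Chars.islower
      have hx : ¬ ('a' ≤ Char.ofNat (c.toNat - 32)) := by
        intro hle
        have hy : (97:Nat) ≤ (Char.ofNat (c.toNat - 32)).toNat := Char.le_def.mp hle
        rw [pvToNat_ofNat _ (by omega)] at hy
        omega
      simp [hx]
    rw [show PySem.Chars.upperChar c = Char.ofNat (c.toNat - 32) by
      unfold PySem.Chars.upperChar; rw [if_pos h]]
    unfold PySem.Chars.upperChar
    rw [if_neg (by rw [h3]; simp)]
  · have h' : PySem.Chars.islower c = false := by simpa using h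
    rw [show PySem.Chars.upperChar c = c by unfold PySem.Chars.upperChar; rw [h']; simp,
      show PySem.Chars.upperChar c = c by unfold PySem.Chars.upperChar; rw [h']; simp]

theorem pvGChar_idem (c : Char) : pvGChar (pvGChar c) = pvGChar c := by
  unfold pvGChar
  by_cases h1 : PySem.Chars.upperChar c = 'U'
  · rw [if_pos h1]
    decide
  · rw [if_neg h1, pvUpperChar_idem, if_neg h1]

theorem pvReplace_go (cs acc : List Char) (fuel : Nat) (hf : cs.length ≤ fuel) :
    PySem.Chars.replace.go ['U'] ['T'] fuel cs acc
      = acc.reverse ++ cs.map (fun c => if c = 'U' then 'T' else c) := by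
  induction cs generalizing fuel acc with
  | nil =>
    cases fuel <;> simp [PySem.Chars.replace.go]
  | cons c t ih =>
    cases fuel with
    | zero => simp at hf
    | succ f =>
      rw [PySem.Chars.replace.go]
      by_cases hc : c = 'U'
      · subst hc
        rw [if_pos (by simp [List.isPrefixOf])]
        simpa using ih ('T' :: acc) f (by simpa using hf)
      · rw [if_neg (by simp [List.isPrefixOf]; intro h; exact hc h.symm)]
        simpa [hc] using ih (c :: acc) f (by simpa using hf)

theorem pvReplace_single (cs : List Char) :
    PySem.Chars.replace cs ['U'] ['T'] = cs.map (fun c => if c = 'U' then 'T' else c) := by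
  unfold PySem.Chars.replace
  rw [if_neg (by simp)]
  simpa using pvReplace_go cs [] cs.length le_rfl

theorem pvNorm_toList (x : String) :
    (pvNormalizeSequence x).toList = x.toList.map pvGChar := by
  unfold pvNormalizeSequence
  rw [PySem.Str.toList_replace, PySem.Str.toList_upper]
  rw [show ("U" : String).toList = ['U'] by rfl, show ("T" : String).toList = ['T'] by rfl]
  rw [pvReplace_single]
  unfold PySem.Chars.upper
  rw [List.map_map]
  rfl

theorem pvNorm_idem (x : String) :
    (pvNormalizeSequence (pvNormalizeSequence x)).toList = (pvNormalizeSequence x).toList := by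
  rw [pvNorm_toList, pvNorm_toList, List.map_map]
  apply List.map_congr_left
  intro a _
  exact pvGChar_idem a

-- generic fold shapes --------------------------------------------------------

-- the inner loop of port A, abstracted over the (decidable) match condition
def pvStep (P : Int → Prop) [DecidablePred P] (p : Int × Int) (i : Int) : Int × Int :=
  if P i then (p.1 + 1, if p.1 + 1 > p.2 then p.1 + 1 else p.2) else (0, p.2)

def pvRunMax (P : Int → Prop) [DecidablePred P] (L : List Int) : Int :=
  (L.foldl (pvStep P) (0, 0)).2

theorem pvSnd_le_foldl (P : Int → Prop) [DecidablePred P] (L : List Int) (r m : Int) :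
    m ≤ (L.foldl (pvStep P) (r, m)).2 := by
  induction L generalizing r m with
  | nil => simp
  | cons a t ih =>
    simp only [List.foldl_cons, pvStep]
    split_ifs with h1 h2
    · exact le_trans (by omega) (ih (r+1) (r+1))
    · exact ih (r+1) m
    · exact ih 0 m

theorem pvFoldl_snd_eq_max (P : Int → Prop) [DecidablePred P] (L : List Int) (r m : Int)
    (hm : 0 ≤ m) :
    (L.foldl (pvStep P) (r, m)).2 = max m (L.foldl (pvStep P) (r, 0)).2 := by
  induction L generalizing r m with
  | nil => simp; omega
  | cons a t ih =>
    simp only [List.foldl_cons, pvStep]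
    by_cases h1 : P a
    · rw [if_pos h1, if_pos h1,
        ih (r+1) (if r + 1 > m then r + 1 else m) (by split_ifs <;> omega),
        ih (r+1) (if r + 1 > 0 then r + 1 else 0) (by split_ifs <;> omega)]
      have h4 := pvSnd_le_foldl P t (r+1) 0
      split_ifs <;> omega
    · rw [if_neg h1, if_neg h1]
      exact ih 0 m hm

theorem pvOuter_eq (g : Int → List Int) (P : Int → Int → Prop) [∀ o, DecidablePred (P o)]
    (O : List Int) (m : Int) (hm : 0 ≤ m) :
    O.foldl (fun mr o => ((g o).foldl (pvStep (P o)) (0, mr)).2) m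
      = O.foldl (fun mr o => max mr (pvRunMax (P o) (g o))) m := by
  induction O generalizing m with
  | nil => rfl
  | cons o t ih =>
    simp only [List.foldl_cons]
    rw [pvFoldl_snd_eq_max _ _ _ _ hm]
    exact ih _ (by omega)

-- a running maximum of nonnegative values: the step (run, max) is characterized by
-- any v satisfying the run recurrence
theorem pvStepFold (q : Nat → Prop) [DecidablePred q] (v : Nat → Int)
    (hv0 : v 0 = if q 0 then 1 else 0)
    (hvs : ∀ t, v (t + 1) = if q (t + 1) then v t + 1 else 0) :
    ∀ (T : Nat) (m : Int), 0 ≤ m →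
      (List.range T).foldl
          (fun (p : Int × Int) t =>
            if q t then (p.1 + 1, if p.1 + 1 > p.2 then p.1 + 1 else p.2) else (0, p.2))
          (0, m)
        = ((if T = 0 then 0 else v (T - 1)),
           (List.range T).foldl (fun b t => max b (v t)) m) := by
  intro T
  induction T with
  | zero => intro m _; simp
  | succ T ih =>
    intro m hm
    rw [List.range_succ, List.foldl_append, List.foldl_append, ih m hm]
    simp only [List.foldl_cons, List.foldl_nil]
    have hM : m ≤ (List.range T).foldl (fun b t => max b (v t)) m :=
      (PySem.List.le_foldl_max_int (List.range T) v m).1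
    by_cases hq : q T
    · rw [if_pos hq]
      simp only [Prod.mk.injEq]
      refine ⟨?_, ?_⟩
      · simp only [Nat.add_sub_cancel, if_neg (Nat.succ_ne_zero T)]
        cases T with
        | zero => simp [hv0, hq]
        | succ t =>
          simp only [Nat.add_sub_cancel, if_neg (Nat.succ_ne_zero t)]
          rw [hvs t, if_pos hq]
      · have hvT : v T = (if T = 0 then 0 else v (T - 1)) + 1 := by
          cases T with
          | zero => simp [hv0, hq]
          | succ t =>
            simp only [if_neg (Nat.succ_ne_zero t), Nat.add_sub_cancel]
            rw [hvs t, if_pos hq]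
        rw [hvT]
        split_ifs <;> omega
    · rw [if_neg hq]
      have hvT : v T = 0 := by
        cases T with
        | zero => rw [hv0, if_neg hq]
        | succ t => rw [hvs t, if_neg hq]
      simp only [Prod.mk.injEq]
      exact ⟨by simp [hvT], by rw [hvT]; omega⟩

theorem pvFoldl_max_init {δ : Type} (f : δ → Int) (L : List δ) (m : Int) (hm : 0 ≤ m) :
    L.foldl (fun b c => max b (f c)) m = max m (L.foldl (fun b c => max b (f c)) 0) := by
  induction L generalizing m with
  | nil => simp; omega
  | cons c t ih =>
    simp only [List.foldl_cons]
    rw [ih (max m (f c)) (by omega), ih (max 0 (f c)) (by omega)]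
    omega

-- a fold of inner max-folds equals a fold of "max acc (inner fold from 0)"
theorem pvNestedMax {γ δ : Type} (outer : List γ) (inner : γ → List δ) (f : γ → δ → Int)
    (m : Int) (hm : 0 ≤ m) :
    outer.foldl (fun b o => (inner o).foldl (fun b x => max b (f o x)) b) m
      = outer.foldl (fun b o => max b ((inner o).foldl (fun b x => max b (f o x)) 0)) m := by
  induction outer generalizing m with
  | nil => rfl
  | cons o t ih =>
    simp only [List.foldl_cons]
    rw [pvFoldl_max_init (f o) (inner o) m hm]
    have h0 : (0:Int) ≤ (inner o).foldl (fun b x => max b (f o x)) 0 :=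
      (PySem.List.le_foldl_max_int (inner o) (f o) 0).1
    exact ih _ (by omega)

-- writing cur[i] = val i at pairwise-distinct indices of a fresh zero row is a map
theorem pvSetFold (cP : Nat → Prop) [DecidablePred cP] (val : Nat → Int) (n : Nat) :
    ∀ k, k ≤ n →
      (List.range k).foldl (fun cur i => if cP i then cur.set i (val i) else cur)
          (List.replicate n 0)
        = (List.range k).map (fun i => if cP i then val i else 0)
            ++ List.replicate (n - k) 0 := by
  intro k
  induction k with
  | zero => intro _; simp
  | succ k ih =>
    intro hk
    rw [List.range_succ, List.foldl_append, ih (by omega)]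
    simp only [List.foldl_cons, List.foldl_nil, List.map_append]
    have hrep : List.replicate (n - k) (0:Int) = 0 :: List.replicate (n - (k + 1)) 0 := by
      rw [show n - k = (n - (k + 1)) + 1 by omega]; rfl
    have hlen : ((List.range k).map (fun i => if cP i then val i else 0)).length = k := by simp
    by_cases hc : cP k
    · rw [if_pos hc, hrep, List.set_append, hlen]
      simp [hc]
    · rw [if_neg hc, hrep]
      simp [hc]

-- cells: membership, nodup, permutation --------------------------------------

theorem pvMem_cellsA (n : Nat) (c : Nat × Nat) :
    c ∈ pvCellsA n ↔ c.1 + 3 ≤ c.2 ∧ c.2 < n := by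
  obtain ⟨i, j⟩ := c
  simp only [pvCellsA, List.mem_flatMap, List.mem_map, List.mem_range, Prod.mk.injEq]
  constructor
  · rintro ⟨k, hk, t, ht, rfl, rfl⟩
    omega
  · rintro ⟨h1, h2⟩
    exact ⟨j - 3 - i, by omega, i, by omega, rfl, by omega⟩

theorem pvMem_cellsB (n : Nat) (c : Nat × Nat) :
    c ∈ pvCellsB n ↔ c.1 + 3 ≤ c.2 ∧ c.2 < n := by
  obtain ⟨i, j⟩ := c
  simp only [pvCellsB, List.mem_flatMap, List.mem_map, List.mem_range, Prod.mk.injEq]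
  constructor
  · rintro ⟨j', hj', i', hi', rfl, rfl⟩
    omega
  · rintro ⟨h1, h2⟩
    exact ⟨j, h2, i, by omega, rfl, rfl⟩

theorem pvNodup_cellsA (n : Nat) : (pvCellsA n).Nodup := by
  apply List.nodup_flatMap.mpr
  refine ⟨?_, ?_⟩
  · intro k _
    refine List.Nodup.map ?_ List.nodup_range
    intro a b h
    simpa using congrArg Prod.fst h
  · refine List.pairwise_lt_range.imp ?_
    intro a b hab c hc1 hc2
    simp only [List.mem_map, List.mem_range] at hc1 hc2
    obtain ⟨t1, _, rfl⟩ := hc1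
    simp only [Prod.mk.injEq] at hc2
    obtain ⟨t2, _, h1, h2⟩ := hc2
    omega

theorem pvNodup_cellsB (n : Nat) : (pvCellsB n).Nodup := by
  apply List.nodup_flatMap.mpr
  refine ⟨?_, ?_⟩
  · intro j _
    refine List.Nodup.map ?_ List.nodup_range
    intro a b h
    simpa using congrArg Prod.fst h
  · refine List.pairwise_lt_range.imp ?_
    intro a b hab c hc1 hc2
    simp only [List.mem_map, List.mem_range] at hc1 hc2
    obtain ⟨t1, _, rfl⟩ := hc1
    simp only [Prod.mk.injEq] at hc2
    obtain ⟨t2, _, h1, h2⟩ := hc2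
    omega

theorem pvCells_perm (n : Nat) : (pvCellsA n).Perm (pvCellsB n) := by
  refine (List.perm_ext_iff_of_nodup (pvNodup_cellsA n) (pvNodup_cellsB n)).mpr ?_
  intro c
  rw [pvMem_cellsA, pvMem_cellsB]

-- A-side reduction ------------------------------------------------------------

-- one diagonal of A: the (run, best) scan is the running maximum of the run lengths pvR
theorem pvDiag_eq (seq : String) (o : Int) (ho3 : 3 ≤ o)
    (ho : o < ((pvNormalizeSequence seq).toList.length : Int)) :
    pvRunMax
        (fun i => PySem.Str.pyGet? (pvNormalizeSequence seq) i
          = PySem.Str.pyGet? (pvReverseComplement (pvNormalizeSequence seq)) (o + i))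
        (PySem.List.pyRange 0 (((pvNormalizeSequence seq).toList.length : Int) - o) 1)
      = (List.range ((pvNormalizeSequence seq).toList.length - o.toNat)).foldl
          (fun b t => max b (pvR (pvNormalizeSequence seq).toList
            (((pvNormalizeSequence seq).toList.map pvTransChar).reverse) t (o.toNat + t))) 0 := by
  have hrc : (pvReverseComplement (pvNormalizeSequence seq)).toList
      = ((pvNormalizeSequence seq).toList.map pvTransChar).reverse := by
    unfold pvReverseComplement
    rw [String.toList_ofList, pvNorm_idem]
  set ls := (pvNormalizeSequence seq).toList with hls
  set rcl := (ls.map pvTransChar).reverse with hrcl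
  unfold pvRunMax
  rw [PySem.List.pyRange_one]
  rw [show (((ls.length : Int) - o) - 0).toNat = ls.length - o.toNat by omega]
  rw [List.foldl_map]
  have hcongr : (List.range (ls.length - o.toNat)).foldl
      (fun (p : Int × Int) (k : Nat) =>
        pvStep (fun i => PySem.Str.pyGet? (pvNormalizeSequence seq) i
          = PySem.Str.pyGet? (pvReverseComplement (pvNormalizeSequence seq)) (o + i)) p (0 + (k : Int)))
      (0, 0)
      = (List.range (ls.length - o.toNat)).foldl
        (fun (p : Int × Int) t =>
          if ls[t]? = rcl[o.toNat + t]? then (p.1 + 1, if p.1 + 1 > p.2 then p.1 + 1 else p.2)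
          else (0, p.2)) (0, 0) := by
    apply PySem.List.foldl_congr_mem
    intro p k _
    unfold pvStep
    have hcond : (PySem.Str.pyGet? (pvNormalizeSequence seq) (0 + (k : Int))
        = PySem.Str.pyGet? (pvReverseComplement (pvNormalizeSequence seq)) (o + (0 + (k : Int))))
          ↔ (ls[k]? = rcl[o.toNat + k]?) := by
      rw [PySem.Str.pyGet?_eq, PySem.Str.pyGet?_eq, PySem.Chars.pyGet?_eq_listPyGet?,
        PySem.Chars.pyGet?_eq_listPyGet?, hrc]
      rw [show (0 : Int) + (k : Int) = (k : Int) by omega,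
        show o + (k : Int) = ((o.toNat + k : Nat) : Int) by omega]
      rw [PySem.List.pyGet?_natCast, PySem.List.pyGet?_natCast]
    exact if_congr hcond rfl rfl
  rw [hcongr]
  rw [pvStepFold (fun t => ls[t]? = rcl[o.toNat + t]?) (fun t => pvR ls rcl t (o.toNat + t))
    (by simp [pvR]) (fun t => by show pvR ls rcl (t + 1) ((o.toNat + t) + 1) = _; simp [pvR, Nat.add_assoc])
    (ls.length - o.toNat) 0 le_rfl]

theorem pvA_eq_cells (seq : String) :
    max_hairpin_run_py seq
      = (pvCellsA ((pvNormalizeSequence seq).toList.length)).foldl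
          (pvMaxF (pvNormalizeSequence seq).toList
                  (((pvNormalizeSequence seq).toList.map pvTransChar).reverse)) 0 := by
  set ls := (pvNormalizeSequence seq).toList with hls
  set rcl := (ls.map pvTransChar).reverse with hrcl
  set n := ls.length with hn
  -- the program, with its inner loop abstracted as pvStep (definitional)
  have hA : max_hairpin_run_py seq
      = (PySem.List.pyRange 3 (PySem.Str.len (pvNormalizeSequence seq)) 1).foldl
          (fun max_run offset =>
            ((PySem.List.pyRange 0 (PySem.Str.len (pvNormalizeSequence seq) - offset) 1).foldl
              (pvStep (fun i => PySem.Str.pyGet? (pvNormalizeSequence seq) i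
                = PySem.Str.pyGet? (pvReverseComplement (pvNormalizeSequence seq)) (offset + i)))
              (0, max_run)).2) 0 := rfl
  rw [hA, PySem.Str.len_eq, ← hls, ← hn]
  rw [pvOuter_eq
    (fun offset => PySem.List.pyRange 0 ((n : Int) - offset) 1)
    (fun offset i => PySem.Str.pyGet? (pvNormalizeSequence seq) i
      = PySem.Str.pyGet? (pvReverseComplement (pvNormalizeSequence seq)) (offset + i))
    (PySem.List.pyRange 3 (n : Int) 1) 0 le_rfl]
  -- replace each diagonal scan by the fold of run lengths, in Nat indexing
  have hstep1 : (PySem.List.pyRange 3 (n : Int) 1).foldl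
      (fun mr offset => max mr (pvRunMax
        (fun i => PySem.Str.pyGet? (pvNormalizeSequence seq) i
          = PySem.Str.pyGet? (pvReverseComplement (pvNormalizeSequence seq)) (offset + i))
        (PySem.List.pyRange 0 ((n : Int) - offset) 1))) 0
      = (PySem.List.pyRange 3 (n : Int) 1).foldl
        (fun mr offset => max mr ((List.range (n - offset.toNat)).foldl
          (fun b t => max b (pvR ls rcl t (offset.toNat + t))) 0)) 0 := by
    apply PySem.List.foldl_congr_mem
    intro mr offset hmem
    have hob := PySem.List.mem_pyRange_one.mp hmem
    rw [pvDiag_eq seq offset hob.1 hob.2]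
  rw [hstep1]
  -- outer loop to Nat indexing
  rw [PySem.List.pyRange_one, List.foldl_map,
    show ((n : Int) - 3).toNat = n - 3 by omega]
  have hstep2 : (List.range (n - 3)).foldl
      (fun (mr : Int) (k : Nat) => max mr ((List.range (n - ((3 : Int) + (k : Int)).toNat)).foldl
        (fun b t => max b (pvR ls rcl t (((3 : Int) + (k : Int)).toNat + t))) 0)) 0
      = (List.range (n - 3)).foldl
        (fun (mr : Int) (k : Nat) => max mr ((List.range (n - (k + 3))).foldl
          (fun b t => max b (pvR ls rcl t ((k + 3) + t))) 0)) 0 := by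
    apply PySem.List.foldl_congr_mem
    intro mr k _
    rw [show ((3 : Int) + (k : Int)).toNat = k + 3 by omega]
  rw [hstep2]
  -- the cell list, diagonal by diagonal
  unfold pvCellsA
  rw [List.foldl_flatMap]
  have hstep3 : (List.range (n - 3)).foldl
      (fun (b : Int) (k : Nat) =>
        ((List.range (n - (k + 3))).map (fun t => (t, k + 3 + t))).foldl (pvMaxF ls rcl) b) 0
      = (List.range (n - 3)).foldl
        (fun (b : Int) (k : Nat) =>
          (List.range (n - (k + 3))).foldl (fun b t => max b (pvR ls rcl t ((k + 3) + t))) b) 0 := by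
    apply PySem.List.foldl_congr_mem
    intro b k _
    rw [List.foldl_map]
    rfl
  rw [hstep3,
    pvNestedMax (List.range (n - 3)) (fun k => List.range (n - (k + 3)))
      (fun k t => pvR ls rcl t ((k + 3) + t)) 0 le_rfl]

-- B-side reduction ------------------------------------------------------------

-- one row of the DP sweep builds exactly the run lengths pvR ¬∑ j
theorem pvRow_eq (s rc : List Char) (j : Nat) (prev : List Int)
    (hprev : ∀ i, i < s.length →
      prev.getD i 0 = if j = 0 then 0 else pvR s rc i (j - 1)) :
    (List.range s.length).foldl
        (fun cur i =>
          if s[i]? = rc[j]? then cur.set i (if 0 < i then prev.getD (i - 1) 0 + 1 else 1)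
          else cur)
        (List.replicate s.length 0)
      = (List.range s.length).map (fun i => pvR s rc i j) := by
  rw [pvSetFold (fun i => s[i]? = rc[j]?) (fun i => if 0 < i then prev.getD (i - 1) 0 + 1 else 1)
      s.length s.length le_rfl]
  simp only [Nat.sub_self, List.replicate_zero, List.append_nil]
  apply List.map_congr_left
  intro i hi
  rw [List.mem_range] at hi
  cases i with
  | zero => simp [pvR]
  | succ t =>
    simp only [Nat.add_sub_cancel]
    rw [hprev t (by omega)]
    cases j with
    | zero => simp [pvR]
    | succ j' => simp [pvR]

-- the row-by-row DP fold: state after j rows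
theorem pvBfold (s rc : List Char) :
    ∀ j, j ≤ s.length →
      (List.range j).foldl
          (fun (st : List Int × Int) j =>
            let cur := (List.range s.length).foldl
              (fun cur i =>
                if s[i]? = rc[j]? then
                  cur.set i (if 0 < i then st.1.getD (i - 1) 0 + 1 else 1)
                else cur)
              (List.replicate s.length 0)
            let best := (List.range (j - 2)).foldl
              (fun b i => if cur.getD i 0 > b then cur.getD i 0 else b) st.2
            (cur, best))
          (List.replicate s.length 0, 0)
        = ((if j = 0 then List.replicate s.length 0
            else (List.range s.length).map (fun i => pvR s rc i (j - 1))),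
           ((List.range j).flatMap
             (fun j' => (List.range (j' - 2)).map (fun i => (i, j')))).foldl
             (pvMaxF s rc) 0) := by
  intro j
  induction j with
  | zero => intro _; rfl
  | succ j ih =>
    intro hj
    rw [List.range_succ, List.foldl_append, ih (by omega)]
    clear ih
    simp only [List.foldl_cons, List.foldl_nil]
    have hrow := pvRow_eq s rc j
      (if j = 0 then List.replicate s.length 0
       else (List.range s.length).map (fun i => pvR s rc i (j - 1)))
      (by
        intro i hi
        by_cases hj0 : j = 0
        · simp [hj0]
        · rw [if_neg hj0, if_neg hj0, PySem.List.getD_map_range _ _ _ _ hi])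
    rw [hrow, List.flatMap_append, List.foldl_append]
    simp only [List.flatMap_cons, List.flatMap_nil, List.append_nil,
      Nat.succ_ne_zero, Nat.add_sub_cancel]
    refine congrArg (Prod.mk _) ?_
    rw [List.foldl_map]
    apply PySem.List.foldl_congr_mem
    intro b i hi
    rw [List.mem_range] at hi
    rw [PySem.List.getD_map_range _ _ _ _ (by omega)]
    unfold pvMaxF
    split_ifs <;> simp <;> omega

set_option maxHeartbeats 1000000 in
theorem pvB_eq_cells (seq : String) :
    max_hairpin_run_py_alt seq
      = (pvCellsB ((pvNormalizeSequence seq).toList.length)).foldl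
          (pvMaxF (pvNormalizeSequence seq).toList
                  (((pvNormalizeSequence seq).toList.map pvTransChar).reverse)) 0 := by
  have hB : max_hairpin_run_py_alt seq
      = ((List.range (pvNormalizeSequence seq).toList.length).foldl
          (fun (st : List Int × Int) j =>
            let cur := (List.range (pvNormalizeSequence seq).toList.length).foldl
              (fun cur i =>
                if (pvNormalizeSequence seq).toList[i]?
                    = (((pvNormalizeSequence seq).toList.map pvTransChar).reverse)[j]? then
                  cur.set i (if 0 < i then st.1.getD (i - 1) 0 + 1 else 1)
                else cur)
              (List.replicate (pvNormalizeSequence seq).toList.length 0)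
            let best := (List.range (j - 2)).foldl
              (fun b i => if cur.getD i 0 > b then cur.getD i 0 else b) st.2
            (cur, best))
          (List.replicate (pvNormalizeSequence seq).toList.length 0, 0)).2 := rfl
  rw [hB, pvBfold _ _ _ le_rfl]
  simp only [pvCellsB]



theorem max_hairpin_run_py_spec' (seq : String) :
    max_hairpin_run_py seq = max_hairpin_run_py_alt seq := by
  rw [pvA_eq_cells, pvB_eq_cells]
  haveI : RightCommutative
      (pvMaxF (pvNormalizeSequence seq).toList
              (((pvNormalizeSequence seq).toList.map pvTransChar).reverse)) :=
    ⟨fun b c d => max_right_comm b _ _⟩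
  exact (pvCells_perm _).foldl_eq 0

-- ===== VERDICT (by name: the statement is the Claim_ definition above) =====
theorem max_hairpin_run_py_spec : Claim_equal_max_hairpin_run_py := by
  intro seq _
  exact max_hairpin_run_py_spec' seq
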